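-- pv_equiv track=rewrite | github.com/JimmyDanger12/colruyt-destack | vision/vision_client.py | get_valid_neighbors
-- ===== SOURCE A (Python) =====
-- def get_valid_neighbors(coords,limits,size):
--     neighbours = []
--     for i in range(-size,size+1):
--         for j in range(-size,size+1):
--             xn, yn = coords[0]+i, coords[1]+j
--             if (xn,yn) != coords:
--                 if 0 <= xn < limits[0] and 0 <= yn < limits[1]:
--                     neighbours.append((xn,yn))
--     return neighbours
-- ===== SOURCE B (Python) =====
-- def get_valid_neighbors(coords, limits, size):
--     cx, cy = coords
--     xlo, xhi = max(0, cx - size), min(limits[0], cx + size + 1)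
--     ylo, yhi = max(0, cy - size), min(limits[1], cy + size + 1)
--     out = []
--     for xn in range(xlo, xhi):
--         if xn == cx:
--             # centre row: skip cy by splitting the row into two ranges
--             out.extend((xn, yn) for yn in range(ylo, min(yhi, cy)))
--             out.extend((xn, yn) for yn in range(max(ylo, cy + 1), yhi))
--         else:
--             out.extend((xn, yn) for yn in range(ylo, yhi))
--     return out
-- ===== Notes on version B (the rewrite author's own statement) =====
-- stated objective: alternative
-- what changed: B replaces A's per-cell center and bounds tests over the full (2*size+1)^2 window by clamping the window to the grid up front and excluding the center row's cell by range arithmetic: the center row is emitted as two split y-ranges (below cy and above cy), so no per-cell comparison is performed at all.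
import Mathlib
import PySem

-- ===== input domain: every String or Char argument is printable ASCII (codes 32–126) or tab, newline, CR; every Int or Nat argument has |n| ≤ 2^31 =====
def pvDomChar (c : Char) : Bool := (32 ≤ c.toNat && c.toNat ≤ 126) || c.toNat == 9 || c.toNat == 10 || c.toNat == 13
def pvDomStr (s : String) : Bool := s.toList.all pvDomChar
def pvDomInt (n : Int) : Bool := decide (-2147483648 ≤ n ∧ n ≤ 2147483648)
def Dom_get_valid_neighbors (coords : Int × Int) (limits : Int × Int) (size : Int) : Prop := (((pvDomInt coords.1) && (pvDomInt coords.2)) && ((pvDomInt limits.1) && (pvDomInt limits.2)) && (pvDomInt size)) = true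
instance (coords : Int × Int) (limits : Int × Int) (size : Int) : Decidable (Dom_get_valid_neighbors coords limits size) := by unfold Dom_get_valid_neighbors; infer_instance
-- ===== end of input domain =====

-- B clamps the window to the grid up front and excludes the center by splitting the
-- center row into two y-ranges, so it performs no per-cell test at all (objective: alternative).

-- ===== PORT A =====
-- literal port: nested loops over range(-size, size+1), per-cell center test then bounds test
def get_valid_neighbors (coords : Int × Int) (limits : Int × Int) (size : Int) : List (Int × Int) :=
  (PySem.List.pyRange (-size) (size + 1)).foldl (fun neighbours i =>
    (PySem.List.pyRange (-size) (size + 1)).foldl (fun neighbours j =>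
      let xn := coords.1 + i
      let yn := coords.2 + j
      if (xn, yn) ≠ coords then
        if 0 ≤ xn ∧ xn < limits.1 ∧ 0 ≤ yn ∧ yn < limits.2 then
          neighbours ++ [(xn, yn)]
        else neighbours
      else neighbours) neighbours) []

-- ===== PORT B =====
-- literal port of Source B: clamped rectangle; the center row is emitted as two split ranges
def get_valid_neighbors_alt (coords : Int × Int) (limits : Int × Int) (size : Int) : List (Int × Int) :=
  let cx := coords.1
  let cy := coords.2
  let xlo := max 0 (cx - size)
  let xhi := min limits.1 (cx + size + 1)
  let ylo := max 0 (cy - size)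
  let yhi := min limits.2 (cy + size + 1)
  (PySem.List.pyRange xlo xhi).foldl (fun out xn =>
    if xn = cx then
      out ++ (PySem.List.pyRange ylo (min yhi cy)).map (fun yn => (xn, yn))
          ++ (PySem.List.pyRange (max ylo (cy + 1)) yhi).map (fun yn => (xn, yn))
    else
      out ++ (PySem.List.pyRange ylo yhi).map (fun yn => (xn, yn))) []

-- ===== PRECONDITION & SPEC =====
def Spec_get_valid_neighbors (coords : Int × Int) (limits : Int × Int) (size : Int) (out : List (Int × Int)) : Prop := out = get_valid_neighbors_alt coords limits size
instance (coords : Int × Int) (limits : Int × Int) (size : Int) (out : List (Int × Int)) : Decidable (Spec_get_valid_neighbors coords limits size out) := by unfold Spec_get_valid_neighbors; infer_instance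

-- ===== CLAIM (what is proved, stated in full; the proofs are below) =====
def Claim_equal_get_valid_neighbors : Prop := ∀ (coords : Int × Int) (limits : Int × Int) (size : Int), Dom_get_valid_neighbors coords limits size → Spec_get_valid_neighbors coords limits size (get_valid_neighbors coords limits size)

-- ===== LEMMAS AND PROOFS =====

-- pyRange is empty when the interval is
theorem pyRange_eq_nil {a b : Int} (h : b ≤ a) : PySem.List.pyRange a b = [] := by
  apply List.eq_nil_iff_forall_not_mem.2
  intro x hx
  rw [PySem.List.mem_pyRange_one] at hx
  omega

-- shifting a range: map (c + ·) over pyRange lo hi is pyRange (c+lo) (c+hi)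
theorem pyRange_map_shift (c lo hi : Int) :
    (PySem.List.pyRange lo hi).map (fun x => c + x) = PySem.List.pyRange (c + lo) (c + hi) := by
  have key : ∀ n : Nat, ∀ lo : Int, (hi - lo).toNat = n →
      (PySem.List.pyRange lo hi).map (fun x => c + x) = PySem.List.pyRange (c + lo) (c + hi) := by
    intro n
    induction n with
    | zero =>
      intro lo hh
      rw [pyRange_eq_nil (by omega), pyRange_eq_nil (by omega)]; rfl
    | succ k ih =>
      intro lo hh
      rw [PySem.List.pyRange_one_cons (by omega),
          PySem.List.pyRange_one_cons (a := c + lo) (by omega)]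
      simp only [List.map_cons, List.cons.injEq, true_and]
      rw [ih (lo + 1) (by omega), show c + (lo + 1) = c + lo + 1 from by ring]
  exact key (hi - lo).toNat lo rfl

-- clamping: filtering a range by an interval test is the range of the intersection
theorem filter_pyRange_clamp (a b lo hi : Int) :
    (PySem.List.pyRange lo hi).filter (fun x => decide (a ≤ x) && decide (x < b))
      = PySem.List.pyRange (max a lo) (min b hi) := by
  have key : ∀ n : Nat, ∀ lo : Int, (hi - lo).toNat = n →
      (PySem.List.pyRange lo hi).filter (fun x => decide (a ≤ x) && decide (x < b))
        = PySem.List.pyRange (max a lo) (min b hi) := by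
    intro n
    induction n with
    | zero =>
      intro lo hh
      rw [pyRange_eq_nil (by omega), pyRange_eq_nil (by omega)]; rfl
    | succ k ih =>
      intro lo hh
      rw [PySem.List.pyRange_one_cons (by omega), List.filter_cons]
      by_cases h1 : a ≤ lo
      · by_cases h2 : lo < b
        · simp only [h1, h2, decide_true, Bool.and_self, if_true]
          rw [ih (lo + 1) (by omega), show max a lo = lo from by omega,
              show max a (lo + 1) = lo + 1 from by omega,
              PySem.List.pyRange_one_cons (show lo < min b hi from by omega)]
        · simp only [h2, decide_false, Bool.and_false, Bool.false_eq_true, if_false]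
          rw [ih (lo + 1) (by omega), pyRange_eq_nil (by omega), pyRange_eq_nil (by omega)]
      · simp only [h1, decide_false, Bool.false_and, Bool.false_eq_true, if_false]
        rw [ih (lo + 1) (by omega), show max a lo = max a (lo + 1) from by omega]
  exact key (hi - lo).toNat lo rfl

-- splitting out one value: the two clamped sub-ranges around m are the range filtered by (· ≠ m)
theorem pyRange_split_ne (m lo hi : Int) :
    PySem.List.pyRange lo (min hi m) ++ PySem.List.pyRange (max lo (m + 1)) hi
      = (PySem.List.pyRange lo hi).filter (fun y => decide (y ≠ m)) := by
  have key : ∀ n : Nat, ∀ lo : Int, (hi - lo).toNat = n →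
      PySem.List.pyRange lo (min hi m) ++ PySem.List.pyRange (max lo (m + 1)) hi
        = (PySem.List.pyRange lo hi).filter (fun y => decide (y ≠ m)) := by
    intro n
    induction n with
    | zero =>
      intro lo hh
      rw [pyRange_eq_nil (le_trans (min_le_left _ _) (by omega)),
          pyRange_eq_nil (le_trans (by omega) (le_max_left _ _)),
          pyRange_eq_nil (show hi ≤ lo from by omega)]
      rfl
    | succ k ih =>
      intro lo hh
      rw [PySem.List.pyRange_one_cons (a := lo) (b := hi) (by omega), List.filter_cons]
      by_cases hm : lo = m
      · rw [if_neg (by simp [hm])]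
        rw [pyRange_eq_nil (show min hi m ≤ lo from by omega), List.nil_append,
            show max lo (m + 1) = lo + 1 from by omega,
            ← ih (lo + 1) (by omega),
            pyRange_eq_nil (show min hi m ≤ lo + 1 from by omega), List.nil_append,
            show max (lo + 1) (m + 1) = lo + 1 from by omega]
      · rw [if_pos (by simp [hm])]
        rcases lt_or_gt_of_ne hm with hlt | hgt
        · -- lo < m : head stays in the first range
          rw [PySem.List.pyRange_one_cons (a := lo) (b := min hi m) (by omega),
              show max lo (m + 1) = max (lo + 1) (m + 1) from by omega,
              List.cons_append, ih (lo + 1) (by omega)]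
        · -- m < lo : first range empty, head stays in the second range
          rw [pyRange_eq_nil (show min hi m ≤ lo from by omega), List.nil_append,
              show max lo (m + 1) = lo from by omega,
              PySem.List.pyRange_one_cons (a := lo) (b := hi) (by omega)]
          congr 1
          rw [← ih (lo + 1) (by omega),
              pyRange_eq_nil (show min hi m ≤ lo + 1 from by omega), List.nil_append,
              show max (lo + 1) (m + 1) = lo + 1 from by omega]
  exact key (hi - lo).toNat lo rfl

-- folding the filter of a list into the flatMap body
theorem flatMap_filter_eq {α β : Type} (p : α → Bool) (h : α → List β) (l : List α) :
    l.flatMap (fun x => if p x then h x else []) = (l.filter p).flatMap h := by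
  induction l with
  | nil => rfl
  | cons x xs ih =>
    rw [List.flatMap_cons, List.filter_cons]
    by_cases hp : p x
    · simp only [hp, if_true, List.flatMap_cons, ih]
    · simp only [hp, Bool.false_eq_true, if_false, List.nil_append, ih]

-- A's value in canonical form: clamped rectangle, rows filtered by the center test
theorem A_eq_clamped (c1 c2 l1 l2 s : Int) :
    get_valid_neighbors (c1, c2) (l1, l2) s
      = (PySem.List.pyRange (max 0 (c1 - s)) (min l1 (c1 + s + 1))).flatMap (fun xn =>
          ((PySem.List.pyRange (max 0 (c2 - s)) (min l2 (c2 + s + 1))).filter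
              (fun yn => decide ((xn, yn) ≠ (c1, c2)))).map (fun yn => (xn, yn))) := by
  unfold get_valid_neighbors
  dsimp only
  -- A's nested foldl as a flatMap of mapped filters over the raw offset ranges
  have stepA :
      (PySem.List.pyRange (-s) (s + 1)).foldl (fun neighbours i =>
        (PySem.List.pyRange (-s) (s + 1)).foldl (fun neighbours j =>
          if (c1 + i, c2 + j) ≠ (c1, c2) then
            if 0 ≤ c1 + i ∧ c1 + i < l1 ∧ 0 ≤ c2 + j ∧ c2 + j < l2 then
              neighbours ++ [(c1 + i, c2 + j)]
            else neighbours
          else neighbours) neighbours) []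
      = (PySem.List.pyRange (-s) (s + 1)).flatMap (fun i =>
          ((PySem.List.pyRange (-s) (s + 1)).filter (fun j =>
            decide ((c1 + i, c2 + j) ≠ (c1, c2)) &&
              ((decide (0 ≤ c1 + i) && decide (c1 + i < l1)) &&
               (decide (0 ≤ c2 + j) && decide (c2 + j < l2))))).map
            (fun j => (c1 + i, c2 + j))) := by
    rw [show ((PySem.List.pyRange (-s) (s + 1)).flatMap (fun i =>
          ((PySem.List.pyRange (-s) (s + 1)).filter (fun j =>
            decide ((c1 + i, c2 + j) ≠ (c1, c2)) &&
              ((decide (0 ≤ c1 + i) && decide (c1 + i < l1)) &&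
               (decide (0 ≤ c2 + j) && decide (c2 + j < l2))))).map
            (fun j => (c1 + i, c2 + j))))
        = [] ++ (PySem.List.pyRange (-s) (s + 1)).flatMap (fun i =>
          ((PySem.List.pyRange (-s) (s + 1)).filter (fun j =>
            decide ((c1 + i, c2 + j) ≠ (c1, c2)) &&
              ((decide (0 ≤ c1 + i) && decide (c1 + i < l1)) &&
               (decide (0 ≤ c2 + j) && decide (c2 + j < l2))))).map
            (fun j => (c1 + i, c2 + j))) from (List.nil_append _).symm]
    rw [← PySem.List.foldl_append_eq_flatMap]
    apply PySem.List.foldl_congr_mem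
    intro acc i _
    rw [← PySem.List.foldl_append_if]
    apply PySem.List.foldl_congr_mem
    intro acc2 j _
    by_cases h1 : (c1 + i, c2 + j) = (c1, c2)
    · rw [if_neg (fun hn => hn h1), if_neg (by simp [h1])]
    · by_cases h2 : 0 ≤ c1 + i ∧ c1 + i < l1 ∧ 0 ≤ c2 + j ∧ c2 + j < l2
      · rw [if_pos h1, if_pos h2,
            if_pos (by simp [h1, h2.1, h2.2.1, h2.2.2.1, h2.2.2.2])]
      · rw [if_pos h1, if_neg h2,
            if_neg (by simp only [Bool.and_eq_true, decide_eq_true_eq]; tauto)]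
  -- shifting the two ranges to absolute coordinates
  have shiftx : PySem.List.pyRange (c1 - s) (c1 + s + 1)
      = (PySem.List.pyRange (-s) (s + 1)).map (fun x => c1 + x) := by
    rw [pyRange_map_shift, show c1 + -s = c1 - s from by ring,
        show c1 + (s + 1) = c1 + s + 1 from by ring]
  have shifty : PySem.List.pyRange (c2 - s) (c2 + s + 1)
      = (PySem.List.pyRange (-s) (s + 1)).map (fun x => c2 + x) := by
    rw [pyRange_map_shift, show c2 + -s = c2 - s from by ring,
        show c2 + (s + 1) = c2 + s + 1 from by ring]
  have inner_shift : ∀ (q : Int → Bool) (xn : Int),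
      ((PySem.List.pyRange (c2 - s) (c2 + s + 1)).filter q).map (fun yn => (xn, yn))
      = ((PySem.List.pyRange (-s) (s + 1)).filter (fun j => q (c2 + j))).map
          (fun j => (xn, c2 + j)) := by
    intro q xn
    rw [shifty, List.filter_map, List.map_map]
    rfl
  -- per offset i, pull the constant x-bounds test out of the inner filter
  have stepX : ∀ i : Int,
      ((PySem.List.pyRange (-s) (s + 1)).filter (fun j =>
          decide ((c1 + i, c2 + j) ≠ (c1, c2)) &&
            ((decide (0 ≤ c1 + i) && decide (c1 + i < l1)) &&
             (decide (0 ≤ c2 + j) && decide (c2 + j < l2))))).map (fun j => (c1 + i, c2 + j))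
      = if (decide (0 ≤ c1 + i) && decide (c1 + i < l1)) = true then
          ((PySem.List.pyRange (-s) (s + 1)).filter (fun j =>
            decide ((c1 + i, c2 + j) ≠ (c1, c2)) &&
              (decide (0 ≤ c2 + j) && decide (c2 + j < l2)))).map
            (fun j => (c1 + i, c2 + j))
        else [] := by
    intro i
    by_cases hx : (decide (0 ≤ c1 + i) && decide (c1 + i < l1)) = true
    · rw [if_pos hx]
      congr 1
      apply List.filter_congr
      intro j _
      rw [hx, Bool.true_and]
    · rw [if_neg hx]
      have hxf : (decide (0 ≤ c1 + i) && decide (c1 + i < l1)) = false := by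
        cases hb : (decide (0 ≤ c1 + i) && decide (c1 + i < l1)) <;> simp_all
      simp [hxf]
  -- the clamped canonical form equals the if-guarded flatMap over raw offsets
  have stepB :
      (PySem.List.pyRange (max 0 (c1 - s)) (min l1 (c1 + s + 1))).flatMap (fun xn =>
        ((PySem.List.pyRange (max 0 (c2 - s)) (min l2 (c2 + s + 1))).filter
            (fun yn => decide ((xn, yn) ≠ (c1, c2)))).map (fun yn => (xn, yn)))
      = (PySem.List.pyRange (-s) (s + 1)).flatMap (fun i =>
          if (decide (0 ≤ c1 + i) && decide (c1 + i < l1)) = true then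
            ((PySem.List.pyRange (-s) (s + 1)).filter (fun j =>
              decide ((c1 + i, c2 + j) ≠ (c1, c2)) &&
                (decide (0 ≤ c2 + j) && decide (c2 + j < l2)))).map
              (fun j => (c1 + i, c2 + j))
          else []) := by
    have hy : ∀ xn : Int,
        ((PySem.List.pyRange (max 0 (c2 - s)) (min l2 (c2 + s + 1))).filter
            (fun yn => decide ((xn, yn) ≠ (c1, c2)))).map (fun yn => (xn, yn))
        = ((PySem.List.pyRange (-s) (s + 1)).filter (fun j =>
            decide ((xn, c2 + j) ≠ (c1, c2)) &&
              (decide (0 ≤ c2 + j) && decide (c2 + j < l2)))).map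
            (fun j => (xn, c2 + j)) := by
      intro xn
      rw [← filter_pyRange_clamp 0 l2 (c2 - s) (c2 + s + 1), List.filter_filter]
      exact inner_shift (fun yn => decide ((xn, yn) ≠ (c1, c2)) &&
        (decide (0 ≤ yn) && decide (yn < l2))) xn
    rw [show (fun xn =>
          ((PySem.List.pyRange (max 0 (c2 - s)) (min l2 (c2 + s + 1))).filter
              (fun yn => decide ((xn, yn) ≠ (c1, c2)))).map (fun yn => (xn, yn)))
        = (fun xn =>
          ((PySem.List.pyRange (-s) (s + 1)).filter (fun j =>
            decide ((xn, c2 + j) ≠ (c1, c2)) &&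
              (decide (0 ≤ c2 + j) && decide (c2 + j < l2)))).map
            (fun j => (xn, c2 + j))) from funext hy]
    rw [← filter_pyRange_clamp 0 l1 (c1 - s) (c1 + s + 1), ← flatMap_filter_eq,
        shiftx, List.flatMap_map]
  rw [stepA,
      show (fun i => ((PySem.List.pyRange (-s) (s + 1)).filter (fun j =>
            decide ((c1 + i, c2 + j) ≠ (c1, c2)) &&
              ((decide (0 ≤ c1 + i) && decide (c1 + i < l1)) &&
               (decide (0 ≤ c2 + j) && decide (c2 + j < l2))))).map
            (fun j => (c1 + i, c2 + j)))
        = (fun i =>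
          if (decide (0 ≤ c1 + i) && decide (c1 + i < l1)) = true then
            ((PySem.List.pyRange (-s) (s + 1)).filter (fun j =>
              decide ((c1 + i, c2 + j) ≠ (c1, c2)) &&
                (decide (0 ≤ c2 + j) && decide (c2 + j < l2)))).map
              (fun j => (c1 + i, c2 + j))
          else []) from funext stepX]
  exact stepB.symm

-- B's value in the same canonical form: the split center row is the filtered row
theorem B_eq_clamped (c1 c2 l1 l2 s : Int) :
    get_valid_neighbors_alt (c1, c2) (l1, l2) s
      = (PySem.List.pyRange (max 0 (c1 - s)) (min l1 (c1 + s + 1))).flatMap (fun xn =>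
          ((PySem.List.pyRange (max 0 (c2 - s)) (min l2 (c2 + s + 1))).filter
              (fun yn => decide ((xn, yn) ≠ (c1, c2)))).map (fun yn => (xn, yn))) := by
  unfold get_valid_neighbors_alt
  dsimp only
  set ylo := max 0 (c2 - s) with hylo
  set yhi := min l2 (c2 + s + 1) with hyhi
  have hrow : ∀ xn : Int,
      (if xn = c1 then
        ((PySem.List.pyRange ylo (min yhi c2)).map (fun yn => (xn, yn)))
          ++ ((PySem.List.pyRange (max ylo (c2 + 1)) yhi).map (fun yn => (xn, yn)))
      else (PySem.List.pyRange ylo yhi).map (fun yn => (xn, yn)))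
      = ((PySem.List.pyRange ylo yhi).filter
          (fun yn => decide ((xn, yn) ≠ (c1, c2)))).map (fun yn => (xn, yn)) := by
    intro xn
    by_cases hx : xn = c1
    · rw [if_pos hx, ← List.map_append, pyRange_split_ne c2 ylo yhi]
      congr 1
      apply List.filter_congr
      intro yn _
      subst hx
      simp [Prod.ext_iff]
    · rw [if_neg hx]
      congr 1
      symm
      apply List.filter_eq_self.2
      intro yn _
      simp [Prod.ext_iff, hx]
  calc (PySem.List.pyRange (max 0 (c1 - s)) (min l1 (c1 + s + 1))).foldl (fun out xn =>
          if xn = c1 then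
            out ++ (PySem.List.pyRange ylo (min yhi c2)).map (fun yn => (xn, yn))
                ++ (PySem.List.pyRange (max ylo (c2 + 1)) yhi).map (fun yn => (xn, yn))
          else
            out ++ (PySem.List.pyRange ylo yhi).map (fun yn => (xn, yn))) []
      = (PySem.List.pyRange (max 0 (c1 - s)) (min l1 (c1 + s + 1))).foldl (fun out xn =>
          out ++ ((PySem.List.pyRange ylo yhi).filter
            (fun yn => decide ((xn, yn) ≠ (c1, c2)))).map (fun yn => (xn, yn))) [] := by
        apply PySem.List.foldl_congr_mem
        intro acc xn _
        rw [← hrow xn]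
        by_cases hx : xn = c1
        · rw [if_pos hx, if_pos hx, List.append_assoc]
        · rw [if_neg hx, if_neg hx]
    _ = _ := by
        rw [PySem.List.foldl_append_eq_flatMap, List.nil_append]

-- ===== VERDICT (by name: the statement is the Claim_ definition above) =====
theorem get_valid_neighbors_spec : Claim_equal_get_valid_neighbors := by
  rintro ⟨c1, c2⟩ ⟨l1, l2⟩ s -
  unfold Spec_get_valid_neighbors
  rw [A_eq_clamped, B_eq_clamped]
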